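-- pv_equiv track=rewrite | github.com/LeroyProjects/Modelisation-optimisation-graphes-et-programmation-lineaire | sources/Programmation_dynamique.py | T_first_without_color
-- ===== SOURCE A (Python) =====
-- def T_first_without_color(j, l, ligne, sequence):
--     """ Entree : j          = indice de la j+1 premieres cases.
--                  l          = indice bloc des li premiers blocs.
--                  ligne      =
--                  sequence   = Sequence de la ligne li (s1,...,sl).
--         Sortie : Retourne True si il y a un coloriage possible d'une ligne non coloriée avec une sequence
--                  donnée sinon retourn False.
--     """
--     # Sequence vide :
--     if l == 0:
--         return True
--     # Au moins un bloc dans sequence de la ligne l(i)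
--     if l >= 1:
--         if j < sequence[l-1]-1 :
--             return False
--         # Deux conditions pour le cas j == sequence[l-1]-1 :
--         if j == sequence[l-1]-1 and l == 1:
--             return True
--         if j == sequence[l-1]-1 and l > 1:
--             return False
--         # On considère la ligne l(i) vide :
--         if j > sequence[l-1] -1:
--             return  T_first_without_color(j-(sequence[l-1])-1, l-1, ligne, sequence)
-- ===== SOURCE B (Python) =====
-- def T_first_without_color(j, l, ligne, sequence):
--     # Iterative: scan block indices from l down to 1, consuming j; no recursion.
--     for k in range(l, 0, -1):
--         s = sequence[k - 1]
--         if j < s - 1: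
--             return False
--         if j == s - 1:
--             return k == 1
--         j -= s + 1
--     return True
-- ===== Notes on version B (the rewrite author's own statement) =====
-- stated objective: simpler
-- what changed: Replaces A's tail recursion with a single for-loop over range(l,0,-1) that mutates j, returning True when the loop finishes.
-- outside the precondition, e.g. on T_first_without_color(0, -1, [], []): A returns None, B returns True
import Mathlib
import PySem

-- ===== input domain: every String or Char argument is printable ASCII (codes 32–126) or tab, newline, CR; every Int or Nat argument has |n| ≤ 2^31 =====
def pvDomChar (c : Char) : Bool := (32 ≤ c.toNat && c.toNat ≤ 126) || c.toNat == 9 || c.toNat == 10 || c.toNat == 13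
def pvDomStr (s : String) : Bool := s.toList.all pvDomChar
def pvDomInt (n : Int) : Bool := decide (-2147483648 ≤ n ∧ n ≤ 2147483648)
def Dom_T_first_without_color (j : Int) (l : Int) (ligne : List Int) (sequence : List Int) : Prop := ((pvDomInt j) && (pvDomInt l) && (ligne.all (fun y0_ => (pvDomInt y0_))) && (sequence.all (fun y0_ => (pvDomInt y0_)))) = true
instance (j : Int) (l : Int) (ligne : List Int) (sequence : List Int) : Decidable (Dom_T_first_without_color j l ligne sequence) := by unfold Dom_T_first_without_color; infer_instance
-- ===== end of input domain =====

-- B replaces A's tail recursion by a single for-loop over range(l,0,-1) (objective: simpler).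

-- ===== PORT A =====
-- literal transliteration of A's recursion; sequence[l-1] via pyGet? (getD 0 only outside Pre_, where Python raises)
def T_first_without_color (j : Int) (l : Int) (ligne : List Int) (sequence : List Int) : Bool :=
  if l = 0 then true
  else if 1 ≤ l then
    if j < (PySem.List.pyGet? sequence (l-1)).getD 0 - 1 then false
    else if j = (PySem.List.pyGet? sequence (l-1)).getD 0 - 1 ∧ l = 1 then true
    else if j = (PySem.List.pyGet? sequence (l-1)).getD 0 - 1 ∧ 1 < l then false
    else if (PySem.List.pyGet? sequence (l-1)).getD 0 - 1 < j then
      T_first_without_color (j - (PySem.List.pyGet? sequence (l-1)).getD 0 - 1) (l-1) ligne sequence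
    else false  -- unreachable (trichotomy); Python falls through only when l < 0 below
  else false  -- Python returns None here (l < 0); outside Pre_
termination_by l.toNat
decreasing_by omega

-- ===== PORT B =====
-- loop body of Source B: state = inl j (still looping) or inr b (early return b)
def pvStepB (sequence : List Int) (st : Int ⊕ Bool) (k : Int) : Int ⊕ Bool :=
  match st with
  | .inr b => .inr b
  | .inl j =>
    let s := (PySem.List.pyGet? sequence (k-1)).getD 0
    if j < s - 1 then .inr false
    else if j = s - 1 then .inr (decide (k = 1))
    else .inl (j - (s + 1))

def T_first_without_color_alt (j : Int) (l : Int) (ligne : List Int) (sequence : List Int) : Bool :=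
  match (PySem.List.pyRange l 0 (-1)).foldl (pvStepB sequence) (Sum.inl j) with
  | .inl _ => true
  | .inr b => b

-- ===== PRECONDITION & SPEC =====
-- Pre_ excludes l < 0 (A falls through returning None, not a bool) and l > len(sequence) (A raises IndexError).
def Pre_T_first_without_color (j : Int) (l : Int) (ligne : List Int) (sequence : List Int) : Prop :=
  0 ≤ l ∧ l ≤ sequence.length
instance (j : Int) (l : Int) (ligne : List Int) (sequence : List Int) : Decidable (Pre_T_first_without_color j l ligne sequence) := by unfold Pre_T_first_without_color; infer_instance
def pvWitness_T_first_without_color : Int × Int × List Int × List Int := (5, 2, [], [2, 1])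

def Spec_T_first_without_color (j : Int) (l : Int) (ligne : List Int) (sequence : List Int) (out : Bool) : Prop := out = T_first_without_color_alt j l ligne sequence
instance (j : Int) (l : Int) (ligne : List Int) (sequence : List Int) (out : Bool) : Decidable (Spec_T_first_without_color j l ligne sequence out) := by unfold Spec_T_first_without_color; infer_instance

-- ===== CLAIM (what is proved, stated in full; the proofs are below) =====
def Claim_equal_T_first_without_color : Prop := ∀ (j : Int) (l : Int) (ligne : List Int) (sequence : List Int), Dom_T_first_without_color j l ligne sequence → Pre_T_first_without_color j l ligne sequence → Spec_T_first_without_color j l ligne sequence (T_first_without_color j l ligne sequence)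

-- ===== LEMMAS AND PROOFS =====
theorem pv_foldl_inr (sequence : List Int) (r : List Int) (b : Bool) :
    r.foldl (pvStepB sequence) (Sum.inr b) = Sum.inr b := by
  induction r with
  | nil => rfl
  | cons x xs ih => simpa [pvStepB] using ih

theorem pv_main : ∀ (n : Nat) (j l : Int) (ligne sequence : List Int), l.toNat = n → 0 ≤ l →
    T_first_without_color j l ligne sequence = T_first_without_color_alt j l ligne sequence := by
  intro n
  induction n with
  | zero =>
    intro j l ligne seq hn h0
    have hl : l = 0 := by omega
    subst hl
    rw [T_first_without_color, T_first_without_color_alt,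
      PySem.List.pyRange_neg_one_eq_nil (le_refl 0)]
    simp
  | succ m ih =>
    intro j l ligne seq hn h0
    have hl : 1 ≤ l := by omega
    rw [T_first_without_color, T_first_without_color_alt,
      PySem.List.pyRange_neg_one_cons (show (0:Int) < l by omega)]
    have hne : ¬ l = 0 := by omega
    simp only [if_neg hne, if_pos hl, List.foldl_cons, pvStepB]
    generalize (PySem.List.pyGet? seq (l - 1)).getD 0 = s
    by_cases h1 : j < s - 1
    · simp [h1, pv_foldl_inr]
    · by_cases h2 : j = s - 1
      · by_cases h3 : l = 1
        · simp [h1, h2, h3, pv_foldl_inr]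
        · have h4 : 1 < l := by omega
          simp [h1, h2, h3, h4, pv_foldl_inr]
      · have h5 : s - 1 < j := by omega
        have hrec := ih (j - s - 1) (l-1) ligne seq (by omega) (by omega)
        rw [T_first_without_color_alt] at hrec
        simp only [if_neg h1, if_neg h2, if_pos h5,
          if_neg (show ¬ (j = s - 1 ∧ l = 1) by tauto),
          if_neg (show ¬ (j = s - 1 ∧ 1 < l) by tauto)]
        have he : j - (s + 1) = j - s - 1 := by ring
        rw [he, hrec]

-- ===== VERDICT (by name: the statement is the Claim_ definition above) =====
theorem T_first_without_color_spec : Claim_equal_T_first_without_color := by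
  intro j l ligne seq _ hpre
  exact pv_main l.toNat j l ligne seq rfl hpre.1
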